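-- pv_equiv track=rewrite | github.com/shulei1127-dot/Closed-Loop-V2 | services/recognizers/field_inference.py | summarize_recognition_status
-- ===== SOURCE A (Python) =====
-- def summarize_recognition_status(record_statuses: list[str]) -> str:
--     if not record_statuses:
--         return "failed"
--     if all(status == "full" for status in record_statuses):
--         return "full"
--     if all(status == "failed" for status in record_statuses):
--         return "failed"
--     return "partial"
-- ===== SOURCE B (Python) =====
-- def summarize_recognition_status(record_statuses: list[str]) -> str:
--     # Single pass: map each status to a label and merge labels with a
--     # state machine ('partial' is absorbing, so we can exit early).
--     summary = None
--     for status in record_statuses: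
--         label = status if status in ("full", "failed") else "partial"
--         summary = label if summary is None else (summary if summary == label else "partial")
--         if summary == "partial":
--             return "partial"
--     return "failed" if summary is None else summary
-- ===== Notes on version B (the rewrite author's own statement) =====
-- stated objective: alternative
-- what changed: Replaces the two staged short-circuiting all() scans with one single-pass state machine: each status is mapped to a label and merged into an accumulator whose absorbing state 'partial' triggers an early exit.
import Mathlib
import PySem

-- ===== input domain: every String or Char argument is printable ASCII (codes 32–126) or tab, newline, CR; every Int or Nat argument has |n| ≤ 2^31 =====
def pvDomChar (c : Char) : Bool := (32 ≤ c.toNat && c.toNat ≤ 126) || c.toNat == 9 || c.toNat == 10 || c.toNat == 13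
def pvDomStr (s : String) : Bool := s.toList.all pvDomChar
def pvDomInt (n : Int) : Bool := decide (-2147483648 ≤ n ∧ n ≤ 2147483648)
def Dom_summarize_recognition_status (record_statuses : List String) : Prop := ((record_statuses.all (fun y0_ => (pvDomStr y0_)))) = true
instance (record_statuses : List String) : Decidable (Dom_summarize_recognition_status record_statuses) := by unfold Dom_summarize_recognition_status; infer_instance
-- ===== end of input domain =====

-- ===== PORT A =====
def summarize_recognition_status (record_statuses : List String) : String :=
  if record_statuses = [] then "failed"
  else if record_statuses.all (fun status => status == "full") then "full"
  else if record_statuses.all (fun status => status == "failed") then "failed"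
  else "partial"

-- ===== PORT B =====
-- B: one pass with an accumulator — each status is mapped to a label, labels are
-- merged by a state machine whose "partial" state is absorbing (early exit).
def summarizeGo (acc : Option String) : List String → String
  | [] => acc.getD "failed"
  | status :: rest =>
      let label := if status == "full" || status == "failed" then status else "partial"
      let summary := match acc with
        | none => label
        | some a => if a == label then a else "partial"
      if summary == "partial" then "partial" else summarizeGo (some summary) rest

def summarize_recognition_status_alt (record_statuses : List String) : String :=
  summarizeGo none record_statuses

-- ===== PRECONDITION & SPEC =====
def Spec_summarize_recognition_status (record_statuses : List String) (out : String) : Prop := out = summarize_recognition_status_alt record_statuses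
instance (record_statuses : List String) (out : String) : Decidable (Spec_summarize_recognition_status record_statuses out) := by unfold Spec_summarize_recognition_status; infer_instance

-- ===== CLAIM (what is proved, stated in full; the proofs are below) =====
def Claim_equal_summarize_recognition_status : Prop := ∀ (record_statuses : List String), Dom_summarize_recognition_status record_statuses → Spec_summarize_recognition_status record_statuses (summarize_recognition_status record_statuses)

-- ===== LEMMAS AND PROOFS =====
theorem summarizeGo_some (a : String) (ha : a = "full" ∨ a = "failed") (xs : List String) :
    summarizeGo (some a) xs = if xs.all (fun x => x == a) then a else "partial" := by
  induction xs with
  | nil =>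
    rcases ha with h | h <;> simp [summarizeGo, h]
  | cons s rest ih =>
    by_cases hs : s = a
    · have hlab : (if s == "full" || s == "failed" then s else "partial") = a := by
        subst hs; rcases ha with h | h <;> simp [h]
      have hane : (a == "partial") = false := by
        rcases ha with h | h <;> simp [h]
      simp only [summarizeGo, List.all_cons, hlab]
      simp [hane, ih, hs]
    · have hlab : a ≠ (if s = "full" ∨ s = "failed" then s else "partial") := by
        rcases ha with h | h <;> subst h <;>
          by_cases h1 : s = "full" <;> by_cases h2 : s = "failed" <;> simp_all
      simp only [summarizeGo, List.all_cons]
      simp [beq_iff_eq, hs, hlab]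

-- ===== VERDICT (by name: the statement is the Claim_ definition above) =====
theorem summarize_recognition_status_spec : Claim_equal_summarize_recognition_status := by
  intro xs _
  unfold Spec_summarize_recognition_status summarize_recognition_status summarize_recognition_status_alt
  cases xs with
  | nil => simp [summarizeGo]
  | cons s rest =>
    by_cases hf : s = "full"
    · subst hf
      by_cases hr : rest.all (fun x => x == "full") = true <;>
        simp [summarizeGo, summarizeGo_some "full" (Or.inl rfl), List.all_cons, hr]
    · by_cases hd : s = "failed"
      · subst hd
        simp [summarizeGo, summarizeGo_some "failed" (Or.inr rfl), List.all_cons]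
      · simp [summarizeGo, List.all_cons, hf, hd]
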